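-- pv_equiv track=rewrite | github.com/SestrenExsis/CodeKatas | withgoogle/sandbox/Solver.py | is_standing_ovation
-- ===== SOURCE A (Python) =====
-- def is_standing_ovation(shyness_levels: tuple) -> bool:
--     standing_ovation = False
--     applause_count = 0
--     for shyness, count in enumerate(shyness_levels):
--         if applause_count >= shyness:
--             applause_count += count
--     if applause_count >= sum(shyness_levels):
--         standing_ovation = True
--     result = standing_ovation
--     return result
-- ===== SOURCE B (Python) =====
-- def is_standing_ovation(shyness_levels: tuple) -> bool:
--     # Stage 1: table of prefix sums (prefix[i] = audience reached before level i).
--     prefix = [0]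
--     for count in shyness_levels:
--         prefix.append(prefix[-1] + count)
--     # Stage 2: first shyness level whose audience-so-far falls short, if any.
--     k = next((i for i in range(len(shyness_levels)) if prefix[i] < i), None)
--     # Stage 3: no shortfall means everyone stands; otherwise only the audience
--     # reached before level k applauds, so compare it with the grand total.
--     return k is None or prefix[k] >= prefix[-1]
-- ===== Notes on version B (the rewrite author's own statement) =====
-- stated objective: alternative
-- what changed: Replaces A's online conditional accumulation plus final full-sum comparison by three staged passes: build an explicit prefix-sum table, look up the first index whose table entry falls below it, and decide the answer by comparing two table entries (the shortfall prefix vs the grand total).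
import Mathlib
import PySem

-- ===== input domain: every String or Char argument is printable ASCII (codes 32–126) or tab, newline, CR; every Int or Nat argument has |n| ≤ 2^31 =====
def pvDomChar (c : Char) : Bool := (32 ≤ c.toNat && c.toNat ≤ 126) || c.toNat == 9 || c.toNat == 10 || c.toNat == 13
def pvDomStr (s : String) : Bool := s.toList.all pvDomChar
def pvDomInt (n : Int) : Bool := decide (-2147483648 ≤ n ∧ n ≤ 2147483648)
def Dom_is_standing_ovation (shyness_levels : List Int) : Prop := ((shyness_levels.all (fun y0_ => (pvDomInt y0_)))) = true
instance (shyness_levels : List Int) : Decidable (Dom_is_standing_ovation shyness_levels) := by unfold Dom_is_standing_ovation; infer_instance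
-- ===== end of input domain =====

-- B replaces A's online conditional accumulation plus full-sum comparison with staged
-- passes over an explicit prefix-sum table: build the table, look up the first shortfall
-- index, compare two table entries (objective: alternative decomposition).

-- ===== PORT A =====
def is_standing_ovation (shyness_levels : List Int) : Bool :=
  -- standing_ovation = False; applause_count = 0; for shyness, count in enumerate(...):
  --   if applause_count >= shyness: applause_count += count
  -- if applause_count >= sum(...): standing_ovation = True; return standing_ovation
  let applause_count : Int :=
    (PySem.List.enumerate shyness_levels).foldl
      (fun applause_count p => if p.1 ≤ applause_count then applause_count + p.2 else applause_count) 0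
  let standing_ovation : Bool := if shyness_levels.sum ≤ applause_count then true else false
  standing_ovation

-- ===== PORT B =====
-- stage 1 of Source B: prefix = [0]; for count in shyness_levels: prefix.append(prefix[-1] + count)
-- (prefix[-1] on the never-empty table: PySem.List.pyGetD _ (-1) 0, exact here)
def pvBuildPrefix (shyness_levels : List Int) : List Int :=
  shyness_levels.foldl (fun pfx count => pfx ++ [PySem.List.pyGetD pfx (-1) 0 + count]) [0]

def is_standing_ovation_alt (shyness_levels : List Int) : Bool :=
  let pfx := pvBuildPrefix shyness_levels
  -- stage 2: k = next((i for i in range(len(...)) if prefix[i] < i), None)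
  let k := (PySem.List.pyRange 0 shyness_levels.length 1).find?
      (fun i => decide (PySem.List.pyGetD pfx i 0 < i))
  -- stage 3: return k is None or prefix[k] >= prefix[-1]
  match k with
  | none => true
  | some k => decide (PySem.List.pyGetD pfx (-1) 0 ≤ PySem.List.pyGetD pfx k 0)

-- ===== PRECONDITION & SPEC =====
def Spec_is_standing_ovation (shyness_levels : List Int) (out : Bool) : Prop := out = is_standing_ovation_alt shyness_levels
instance (shyness_levels : List Int) (out : Bool) : Decidable (Spec_is_standing_ovation shyness_levels out) := by unfold Spec_is_standing_ovation; infer_instance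

-- ===== CLAIM (what is proved, stated in full; the proofs are below) =====
def Claim_equal_is_standing_ovation : Prop := ∀ (shyness_levels : List Int), Dom_is_standing_ovation shyness_levels → Spec_is_standing_ovation shyness_levels (is_standing_ovation shyness_levels)

-- ===== LEMMAS AND PROOFS =====

-- common characterisation both ports are reduced to: the first shortfall index as a find? over List.range
def pvFindShort (xs : List Int) : Option Nat :=
  (List.range xs.length).find? (fun j => decide ((xs.take j).sum < (j : Int)))

def pvSpecOf (xs : List Int) : Bool :=
  match pvFindShort xs with
  | none => true
  | some j => decide (xs.sum ≤ (xs.take j).sum)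

-- ---- A side ----

-- once the accumulator is below the current index, A's fold never adds again
theorem foldA_stuck (xs : List Int) : ∀ (s a : Int), a < s →
    (PySem.List.enumerate xs s).foldl
      (fun applause_count p => if p.1 ≤ applause_count then applause_count + p.2 else applause_count) a = a := by
  induction xs with
  | nil => intro s a _; simp [PySem.List.enumerate_nil]
  | cons c rest ih =>
    intro s a h
    rw [PySem.List.enumerate_cons]
    simp only [List.foldl_cons, if_neg (by omega : ¬ s ≤ a)]
    exact ih (s + 1) a (by omega)

-- A's final test, as a function of the generalized loop state, written through pvFindShort-style find?
theorem foldA_char (xs : List Int) : ∀ (s a : Int),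
    decide (a + xs.sum ≤ (PySem.List.enumerate xs s).foldl
      (fun applause_count p => if p.1 ≤ applause_count then applause_count + p.2 else applause_count) a)
    = match (List.range xs.length).find? (fun j => decide (a + (xs.take j).sum < s + j)) with
      | none => true
      | some j => decide (a + xs.sum ≤ a + (xs.take j).sum) := by
  induction xs with
  | nil => intro s a; simp [PySem.List.enumerate_nil]
  | cons c rest ih =>
    intro s a
    rw [PySem.List.enumerate_cons]
    simp only [List.foldl_cons, List.length_cons, List.range_succ_eq_map]
    by_cases hs : s ≤ a
    · rw [if_pos hs,
        List.find?_cons_of_neg (by simp; omega),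
        List.find?_map]
      have := ih (s + 1) (a + c)
      rw [show a + (c :: rest).sum = (a + c) + rest.sum by simp; ring, this]
      rw [show ((fun j : Nat => decide (a + ((c :: rest).take j).sum < s + (j : Int))) ∘ Nat.succ)
            = fun j : Nat => decide (a + c + (rest.take j).sum < s + 1 + (j : Int)) by
          funext j; simp only [Function.comp_def, List.take_succ_cons, List.sum_cons,
            decide_eq_decide]; push_cast; omega]
      cases hf : (List.range rest.length).find?
          (fun j => decide (a + c + (rest.take j).sum < s + 1 + (j : Int))) with
      | none => simp
      | some j =>
        simp only [Option.map_some, List.take_succ_cons, List.sum_cons, decide_eq_decide]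
        omega
    · rw [if_neg hs, foldA_stuck rest (s + 1) a (by omega),
        List.find?_cons_of_pos (by simp; omega)]
      simp only [List.take_zero, List.sum_nil, decide_eq_decide]
      omega

theorem A_eq_spec (xs : List Int) : is_standing_ovation xs = pvSpecOf xs := by
  have h := foldA_char xs 0 0
  simp only [zero_add] at h
  unfold is_standing_ovation pvSpecOf pvFindShort
  rw [← h]
  by_cases hx : xs.sum ≤ (PySem.List.enumerate xs).foldl
      (fun applause_count p => if p.1 ≤ applause_count then applause_count + p.2 else applause_count) 0 <;>
    simp [hx]

-- ---- B side ----

-- the prefix table is the map of take-sums over range (n+1)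
theorem buildPrefix_aux (xs : List Int) : ∀ (pre : List Int) (a : Int),
    xs.foldl (fun pfx count => pfx ++ [PySem.List.pyGetD pfx (-1) 0 + count]) (pre ++ [a])
      = pre ++ List.scanl (fun x y => x + y) a xs := by
  induction xs with
  | nil => intro pre a; rfl
  | cons c rest ih =>
    intro pre a
    simp only [List.foldl_cons, PySem.List.pyGetD_neg_one_append_singleton, List.scanl_cons]
    rw [List.append_assoc pre [a] [a + c]]
    have := ih (pre ++ [a]) (a + c)
    simpa [List.append_assoc] using this

theorem scanl_eq_map_range (xs : List Int) : ∀ (a : Int),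
    List.scanl (fun x y => x + y) a xs
      = (List.range (xs.length + 1)).map (fun i => a + (xs.take i).sum) := by
  induction xs with
  | nil => intro a; simp
  | cons c rest ih =>
    intro a
    simp only [List.scanl_cons, List.length_cons, List.range_succ_eq_map, List.map_cons,
      List.map_map, List.take_zero, List.sum_nil, Function.comp_def, List.take_succ_cons,
      List.sum_cons]
    rw [ih (a + c)]
    congr 1
    · simp
    · rw [List.range_succ_eq_map, List.map_cons, List.map_map]
      refine congrArg₂ List.cons (by simp) ?_
      refine List.map_congr_left (fun x hx => ?_)
      simp only [Function.comp_def]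
      ring

theorem buildPrefix_eq (xs : List Int) :
    pvBuildPrefix xs = (List.range (xs.length + 1)).map (fun i => (xs.take i).sum) := by
  unfold pvBuildPrefix
  have := buildPrefix_aux xs [] 0
  simp only [List.nil_append] at this
  rw [this, scanl_eq_map_range]
  simp

theorem prefix_get_nat (xs : List Int) (j : Nat) (hj : j ≤ xs.length) :
    PySem.List.pyGetD (pvBuildPrefix xs) (j : Int) 0 = (xs.take j).sum := by
  rw [buildPrefix_eq, PySem.List.pyGetD_natCast]
  rw [List.getD_eq_getElem?_getD, List.getElem?_map, List.getElem?_range (by omega)]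
  simp

theorem prefix_last (xs : List Int) :
    PySem.List.pyGetD (pvBuildPrefix xs) (-1) 0 = xs.sum := by
  rw [buildPrefix_eq]
  have hne : (List.range (xs.length + 1)).map (fun i => (xs.take i).sum) ≠ [] := by
    simp [List.range_succ]
  rw [PySem.List.pyGetD_neg_one _ _ hne]
  rw [List.getLast_eq_getElem]
  simp [List.getElem_map, List.getElem_range]

theorem pvFind?_congr_mem {a : Type} (l : List a) (p q : a → Bool)
    (h : ∀ x ∈ l, p x = q x) : l.find? p = l.find? q := by
  induction l with
  | nil => rfl
  | cons x rest ih =>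
    simp only [List.find?_cons]
    rw [h x (List.mem_cons_self), ih (fun y hy => h y (List.mem_cons_of_mem x hy))]

theorem B_eq_spec (xs : List Int) : is_standing_ovation_alt xs = pvSpecOf xs := by
  unfold is_standing_ovation_alt pvSpecOf pvFindShort
  rw [PySem.List.pyRange_one]
  simp only [sub_zero, Int.toNat_natCast, List.find?_map, Function.comp_def, zero_add]
  rw [pvFind?_congr_mem _ _ (fun j : Nat => decide ((xs.take j).sum < (j : Int)))
      (fun j hj => by
        have hjlen : j < xs.length := List.mem_range.mp hj
        rw [prefix_get_nat xs j (le_of_lt hjlen)])]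
  cases hf : (List.range xs.length).find? (fun j => decide ((xs.take j).sum < (j : Int))) with
  | none => simp
  | some j =>
    have hjlen : j < xs.length := by
      have hmem := List.mem_of_find?_eq_some hf
      simpa using List.mem_range.mp hmem
    simp only [Option.map_some]
    rw [prefix_last, prefix_get_nat xs j (le_of_lt hjlen)]

-- ===== VERDICT (by name: the statement is the Claim_ definition above) =====
theorem is_standing_ovation_spec : Claim_equal_is_standing_ovation := by
  intro xs _
  unfold Spec_is_standing_ovation
  rw [A_eq_spec, B_eq_spec]
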